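-- pv_equiv track=rewrite | github.com/svmotha/sort | build/fileSort/Arranger.py | replace_special_chars
-- ===== SOURCE A (Python) =====
-- def replace_special_chars(temp):
--     reserved_chars = ['<', '>', ':', '"', '/', '\\', '|', '?', '*']  # see tutorial for explanation
--     if temp is not None:
--         for i in range(len(reserved_chars)):
--             if reserved_chars[i] in temp:
--                 temp = temp.replace(reserved_chars[i], ' ')
--     else:
--         pass
--     return temp
-- ===== SOURCE B (Python) =====
-- def replace_special_chars(temp):
--     if temp is None:
--         return None
--     table = str.maketrans('<>:"/\\|?*', ' ' * 9)
--     return temp.translate(table)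
-- ===== Notes on version B (the rewrite author's own statement) =====
-- stated objective: idiomatic
-- what changed: B builds a char-to-char translation table with str.maketrans and applies it in one str.translate pass (per-character table lookup), instead of A's nine separate str.replace scans over the whole string.
import Mathlib
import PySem

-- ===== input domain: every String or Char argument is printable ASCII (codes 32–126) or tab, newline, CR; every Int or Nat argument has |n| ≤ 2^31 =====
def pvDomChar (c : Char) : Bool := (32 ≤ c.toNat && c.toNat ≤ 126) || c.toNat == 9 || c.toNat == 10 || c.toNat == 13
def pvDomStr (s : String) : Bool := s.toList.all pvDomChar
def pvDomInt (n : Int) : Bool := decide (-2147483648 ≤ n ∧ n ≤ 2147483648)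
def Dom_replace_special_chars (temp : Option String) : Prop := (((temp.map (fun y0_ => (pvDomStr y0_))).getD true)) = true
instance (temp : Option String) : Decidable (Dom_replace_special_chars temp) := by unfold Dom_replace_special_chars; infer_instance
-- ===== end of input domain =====

-- B applies a str.maketrans/str.translate translation table (one per-character lookup
-- pass) instead of A's nine str.replace scans (objective: idiomatic).

-- ===== PORT A =====
-- A's reserved_chars list
def pvReservedA : List Char := ['<', '>', ':', '"', '/', '\\', '|', '?', '*']

-- A's loop: for each reserved char, if it is in temp, temp = temp.replace(char, ' ')
def replace_special_chars (temp : Option String) : Option String :=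
  match temp with
  | some s =>
      some (pvReservedA.foldl
        (fun t c =>
          if PySem.Str.isIn (String.ofList [c]) t then PySem.Str.replace t (String.ofList [c]) " " else t)
        s)
  | none => none

-- ===== PORT B =====
-- table = str.maketrans('<>:"/\\|?*', ' ' * 9): a char→char mapping built by zipping
def pvTrTable : PySem.Dict Char Char :=
  PySem.Dict.ofList (List.zip "<>:\"/\\|?*".toList (List.replicate 9 ' '))

-- temp.translate(table): each character is looked up in the table, kept if absent
def replace_special_chars_alt (temp : Option String) : Option String :=
  temp.map (fun s => String.ofList (s.toList.map (fun c => pvTrTable.getD c c)))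

-- ===== PRECONDITION & SPEC =====
def Spec_replace_special_chars (temp : Option String) (out : Option String) : Prop := out = replace_special_chars_alt temp
instance (temp : Option String) (out : Option String) : Decidable (Spec_replace_special_chars temp out) := by unfold Spec_replace_special_chars; infer_instance

-- ===== CLAIM (what is proved, stated in full; the proofs are below) =====
def Claim_equal_replace_special_chars : Prop := ∀ (temp : Option String), Dom_replace_special_chars temp → Spec_replace_special_chars temp (replace_special_chars temp)

-- ===== LEMMAS AND PROOFS =====

def pvRepl (r x : Char) : Char := if x = r then ' ' else x

-- single-character replace is a map over the characters
theorem pv_go_singleton (c : Char) (l acc : List Char) (fuel : Nat) (h : l.length ≤ fuel) :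
    PySem.Chars.replace.go [c] [' '] fuel l acc
      = acc.reverse ++ l.map (pvRepl c) := by
  induction l generalizing fuel acc with
  | nil => cases fuel <;> simp [PySem.Chars.replace.go]
  | cons a t ih =>
      cases fuel with
      | zero => simp at h
      | succ f =>
          simp only [List.length_cons, Nat.succ_le_succ_iff] at h
          by_cases hac : a = c
          · subst hac
            have hp : List.isPrefixOf [a] (a :: t) = true := by simp [List.isPrefixOf]
            simp only [PySem.Chars.replace.go, hp, if_pos]
            rw [show List.drop [a].length (a :: t) = t from rfl, ih _ _ h]
            simp [pvRepl]
          · have hp : List.isPrefixOf [c] (a :: t) = false := by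
              simp [List.isPrefixOf]; exact fun h' => hac h'.symm
            simp only [PySem.Chars.replace.go, hp, Bool.false_eq_true, if_false]
            rw [ih _ _ h]
            simp [pvRepl, hac]

theorem pv_replace_singleton (c : Char) (s : List Char) :
    PySem.Chars.replace s [c] [' '] = s.map (pvRepl c) := by
  unfold PySem.Chars.replace
  rw [if_neg (by simp)]
  exact pv_go_singleton c s [] s.length le_rfl

theorem pv_map_id_of_not_mem (c : Char) (s : List Char) (h : c ∉ s) :
    s.map (pvRepl c) = s := by
  conv_rhs => rw [← List.map_id s]
  apply List.map_congr_left
  intro x hx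
  have hxc : x ≠ c := fun he => h (he ▸ hx)
  simp [pvRepl, hxc]

-- A's loop step (with its `in` guard) is the map step, on the character lists
theorem pv_stepA (c : Char) (t : String) :
    ((if PySem.Str.isIn (String.ofList [c]) t then PySem.Str.replace t (String.ofList [c]) " " else t) : String).toList
      = t.toList.map (pvRepl c) := by
  by_cases hin : PySem.Str.isIn (String.ofList [c]) t = true
  · rw [if_pos hin, PySem.Str.toList_replace]
    simpa [String.toList_ofList] using pv_replace_singleton c t.toList
  · rw [if_neg hin]
    have hin' : PySem.Chars.isIn [c] t.toList = false := by
      simpa [PySem.Str.isIn, String.toList_ofList] using eq_false_of_ne_true hin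
    have hinf : ¬ ([c] <:+: t.toList) := (PySem.Chars.isIn_eq_false_iff _ _).mp hin'
    have hmem : c ∉ t.toList := by
      intro hm
      rcases List.append_of_mem hm with ⟨l₁, l₂, he⟩
      exact hinf ⟨l₁, l₂, by rw [he]; simp⟩
    exact (pv_map_id_of_not_mem c t.toList hmem).symm

-- fold of maps = one map against membership, provided ' ' is not reserved
theorem pv_fold_map (rs : List Char) (s : List Char) (hs : ' ' ∉ rs) :
    (rs.foldl (fun (t : List Char) c => t.map (pvRepl c)) s)
      = s.map (fun x => if x ∈ rs then ' ' else x) := by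
  induction rs generalizing s with
  | nil => simp
  | cons r rs ih =>
      simp only [List.foldl_cons]
      rw [ih _ (fun h => hs (List.mem_cons_of_mem _ h))]
      rw [List.map_map]
      apply List.map_congr_left
      intro x _
      by_cases hxr : x = r
      · subst hxr
        simp [Function.comp, pvRepl]
      · simp [Function.comp, pvRepl, hxr]

-- A's fold over strings, read on the character lists
theorem pv_foldA (rs : List Char) (s : String) :
    (rs.foldl
      (fun (t : String) c =>
        if PySem.Str.isIn (String.ofList [c]) t then PySem.Str.replace t (String.ofList [c]) " " else t) s).toList
      = rs.foldl (fun (t : List Char) c => t.map (pvRepl c)) s.toList := by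
  induction rs generalizing s with
  | nil => rfl
  | cons r rs ih =>
      simp only [List.foldl_cons]
      rw [ih]
      congr 1
      exact pv_stepA r s

-- a lookup in B's translation table is the membership test against A's list
theorem pv_tableD (c : Char) :
    pvTrTable.getD c c = if c ∈ pvReservedA then ' ' else c := by
  by_cases h : c ∈ pvReservedA
  · rw [if_pos h]
    unfold pvReservedA at h
    fin_cases h <;> decide
  · rw [if_neg h]
    apply PySem.Dict.getD_of_not_contains
    simp only [pvReservedA, List.mem_cons, List.not_mem_nil, or_false, not_or] at h
    obtain ⟨h1, h2, h3, h4, h5, h6, h7, h8, h9⟩ := h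
    have he : pvTrTable = PySem.Dict.mk [('<',' '),('>',' '),(':',' '),('"',' '),('/',' '),
        ('\\',' '),('|',' '),('?',' '),('*',' ')] := by decide
    rw [he]
    simp only [PySem.Dict.contains_mk, List.any_cons, List.any_nil, Bool.or_false,
      Bool.or_eq_false_iff, beq_eq_false_iff_ne]
    exact ⟨Ne.symm h1, Ne.symm h2, Ne.symm h3, Ne.symm h4, Ne.symm h5, Ne.symm h6,
      Ne.symm h7, Ne.symm h8, Ne.symm h9⟩

-- ===== VERDICT (by name: the statement is the Claim_ definition above) =====
theorem replace_special_chars_spec : Claim_equal_replace_special_chars := by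
  intro temp _
  unfold Spec_replace_special_chars
  match temp with
  | none => rfl
  | some s =>
      simp only [replace_special_chars, replace_special_chars_alt, Option.map_some,
        Option.some.injEq]
      rw [← String.toList_inj, pv_foldA, pv_fold_map _ _ (by decide), String.toList_ofList]
      exact List.map_congr_left fun x _ => (pv_tableD x).symm
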